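-- pv_equiv track=rewrite | github.com/GlennaMayola/OcrAllergy | ocr.py | extract_ingredients_list
-- ===== SOURCE A (Python) =====
-- def extract_ingredients_list(ocr_output):
--     ingredient_list = []
--     for entry in ocr_output:
--         text = entry[1]  # Extract the text
--         # Split by both commas and semicolons to separate ingredients properly
--         split_text = text.replace(';', ',').split(',')
--         for part in split_text:
--             # Clean each part and remove unwanted characters
--             cleaned_text = ''.join(filter(lambda x: x.isalnum() or x.isspace(), part)).strip()
--             if cleaned_text:  # Add non-empty entries to the list
--                 ingredient_list.append(cleaned_text)
--     return ingredient_list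
-- ===== SOURCE B (Python) =====
-- def extract_ingredients_list(ocr_output):
--     # Single character-level pass: split/clean/filter fused into one scan with a buffer.
--     ingredient_list = []
--     for entry in ocr_output:
--         buf = []
--         for ch in entry[1]:
--             if ch == ',' or ch == ';':
--                 cleaned = ''.join(buf).strip()
--                 if cleaned:
--                     ingredient_list.append(cleaned)
--                 buf = []
--             elif ch.isalnum() or ch.isspace():
--                 buf.append(ch)
--         cleaned = ''.join(buf).strip()
--         if cleaned:
--             ingredient_list.append(cleaned)
--     return ingredient_list
-- ===== Notes on version B (the rewrite author's own statement) =====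
-- stated objective: alternative
-- what changed: Replaces A's per-entry replace/split pipeline with per-part filter-join-strip by a single fused character-level scan per text that splits, filters and flushes in one pass with a buffer, building no intermediate part strings.
import Mathlib
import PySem

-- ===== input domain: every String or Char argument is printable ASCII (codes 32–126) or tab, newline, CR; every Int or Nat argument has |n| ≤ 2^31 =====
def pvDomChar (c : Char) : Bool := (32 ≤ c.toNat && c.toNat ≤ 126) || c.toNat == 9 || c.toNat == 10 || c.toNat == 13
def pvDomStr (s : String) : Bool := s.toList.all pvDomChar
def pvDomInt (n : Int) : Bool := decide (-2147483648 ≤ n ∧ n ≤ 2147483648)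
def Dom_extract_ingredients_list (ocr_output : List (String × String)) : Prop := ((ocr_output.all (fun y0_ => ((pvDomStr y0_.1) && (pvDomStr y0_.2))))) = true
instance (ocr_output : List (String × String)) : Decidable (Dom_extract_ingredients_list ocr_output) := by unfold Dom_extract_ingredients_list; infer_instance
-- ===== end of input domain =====

-- B replaces A's replace/split/filter/strip pipeline per entry with one fused character-level
-- scan over each text (alternative decomposition; same results).

-- ===== PORT A =====
-- A: for each entry, replace ';'→',', split on ',', clean each part by keeping
-- alnum/space chars, strip, append when non-empty.  (strings handled on the List Char side)
def extract_ingredients_list (ocr_output : List (String × String)) : List String :=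
  ocr_output.foldl (fun ingredient_list entry =>
    let text := entry.2
    let split_text := PySem.Chars.splitOn (PySem.Chars.replace text.toList [';'] [',']) [',']
    split_text.foldl (fun ing part =>
      let cleaned := PySem.Chars.strip
        (part.filter (fun x => PySem.Chars.isalnum x || PySem.Chars.isspace x))
      if cleaned.isEmpty then ing else ing ++ [String.ofList cleaned]) ingredient_list) []

-- ===== PORT B =====
-- flush the current buffer: strip it; append when non-empty
def pvFlush (buf : List Char) (acc : List String) : List String :=
  let cleaned := PySem.Chars.strip buf
  if cleaned.isEmpty then acc else acc ++ [String.ofList cleaned]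

-- the fused scan over one text's characters (buf holds the kept chars of the current part)
def pvScan : List Char → List Char → List String → List Char × List String
  | [], buf, acc => (buf, acc)
  | c :: rest, buf, acc =>
    if c = ',' ∨ c = ';' then pvScan rest [] (pvFlush buf acc)
    else if PySem.Chars.isalnum c || PySem.Chars.isspace c then pvScan rest (buf ++ [c]) acc
    else pvScan rest buf acc

def extract_ingredients_list_alt (ocr_output : List (String × String)) : List String :=
  ocr_output.foldl (fun acc entry =>
    let p := pvScan entry.2.toList [] acc
    pvFlush p.1 p.2) []

-- ===== PRECONDITION & SPEC =====
def Spec_extract_ingredients_list (ocr_output : List (String × String)) (out : List String) : Prop := out = extract_ingredients_list_alt ocr_output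
instance (ocr_output : List (String × String)) (out : List String) : Decidable (Spec_extract_ingredients_list ocr_output out) := by unfold Spec_extract_ingredients_list; infer_instance

-- ===== CLAIM (what is proved, stated in full; the proofs are below) =====
def Claim_equal_extract_ingredients_list : Prop := ∀ (ocr_output : List (String × String)), Dom_extract_ingredients_list ocr_output → Spec_extract_ingredients_list ocr_output (extract_ingredients_list ocr_output)

-- ===== LEMMAS AND PROOFS =====

-- the keep predicate and the ';'→',' substitution, named for the proofs
def pvKeep (c : Char) : Bool := PySem.Chars.isalnum c || PySem.Chars.isspace c
def pvSigma (c : Char) : Char := if c = ';' then ',' else c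

-- structural characterisation of split-on-','
def pvConsHead (p : List Char) : List (List Char) → List (List Char)
  | [] => [p]
  | h :: r => (p ++ h) :: r

def pvSplitCh : List Char → List (List Char)
  | [] => [[]]
  | c :: t => if c = ',' then [] :: pvSplitCh t else pvConsHead [c] (pvSplitCh t)

theorem pvSplitCh_ne_nil (cs : List Char) : pvSplitCh cs ≠ [] := by
  cases cs with
  | nil => simp [pvSplitCh]
  | cons c t =>
    simp only [pvSplitCh]
    split
    · simp
    · cases h : pvSplitCh t <;> simp [pvConsHead]

theorem pvConsHead_nil (ps : List (List Char)) (h : ps ≠ []) : pvConsHead [] ps = ps := by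
  cases ps with
  | nil => exact absurd rfl h
  | cons p r => simp [pvConsHead]

theorem pvConsHead_consHead (p q : List Char) (ps : List (List Char)) :
    pvConsHead p (pvConsHead q ps) = pvConsHead (p ++ q) ps := by
  cases ps <;> simp [pvConsHead]

-- replace with a single-char pattern is a character map
theorem pvReplace_go (cs : List Char) : ∀ (fuel : Nat) (acc : List Char), cs.length ≤ fuel →
    PySem.Chars.replace.go [';'] [','] fuel cs acc = acc.reverse ++ cs.map pvSigma := by
  induction cs with
  | nil => intro fuel acc _; cases fuel <;> simp [PySem.Chars.replace.go]
  | cons c t ih =>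
    intro fuel acc hle
    cases fuel with
    | zero => simp at hle
    | succ f =>
      simp only [PySem.Chars.replace.go]
      by_cases hc : c = ';'
      · have hp : List.isPrefixOf [';'] (c :: t) = true := by simp [List.isPrefixOf, hc]
        rw [if_pos hp]
        simp only [List.length_cons] at hle
        simp only [List.length_cons, List.length_nil, List.drop_succ_cons, List.drop_zero]
        rw [ih f _ (by omega)]
        simp [List.map, pvSigma, hc]
      · have hp : List.isPrefixOf [';'] (c :: t) = false := by
          simp only [List.isPrefixOf]
          simp only [Bool.and_eq_false_iff, beq_eq_false_iff_ne, ne_eq]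
          left; exact fun h => hc h.symm
        rw [if_neg (by simp [hp])]
        simp only [List.length_cons] at hle
        rw [ih f _ (by omega)]
        simp [List.map, pvSigma, hc]

theorem pvReplace_eq (cs : List Char) :
    PySem.Chars.replace cs [';'] [','] = cs.map pvSigma := by
  simp only [PySem.Chars.replace, List.isEmpty_cons, if_false, Bool.false_eq_true]
  simpa using pvReplace_go cs cs.length [] le_rfl

-- splitOn with sep "," is the structural pvSplitCh
theorem pvSplitOn_go (cs : List Char) : ∀ (fuel : Nat) (cur : List Char) (acc : List (List Char)),
    cs.length ≤ fuel →
    PySem.Chars.splitOn.go [','] fuel cs cur acc = acc.reverse ++ pvConsHead cur.reverse (pvSplitCh cs) := by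
  induction cs with
  | nil => intro fuel cur acc _; cases fuel <;> simp [PySem.Chars.splitOn.go, pvSplitCh, pvConsHead]
  | cons c t ih =>
    intro fuel cur acc hle
    cases fuel with
    | zero => simp at hle
    | succ f =>
      simp only [PySem.Chars.splitOn.go]
      by_cases hc : c = ','
      · have hp : List.isPrefixOf [','] (c :: t) = true := by simp [List.isPrefixOf, hc]
        rw [if_pos hp]
        simp only [List.length_cons] at hle
        simp only [List.length_cons, List.length_nil, List.drop_succ_cons, List.drop_zero]
        rw [ih f _ _ (by omega)]
        simp only [List.reverse_cons, List.reverse_nil]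
        rw [pvConsHead_nil _ (pvSplitCh_ne_nil t)]
        simp [pvSplitCh, hc, pvConsHead]
      · have hp : List.isPrefixOf [','] (c :: t) = false := by
          simp only [List.isPrefixOf]
          simp only [Bool.and_eq_false_iff, beq_eq_false_iff_ne, ne_eq]
          left; exact fun h => hc h.symm
        rw [if_neg (by simp [hp])]
        simp only [List.length_cons] at hle
        rw [ih f _ _ (by omega)]
        simp only [List.reverse_cons]
        rw [show pvSplitCh (c :: t) = pvConsHead [c] (pvSplitCh t) by simp [pvSplitCh, hc]]
        rw [pvConsHead_consHead]

theorem pvSplitOn_eq (cs : List Char) :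
    PySem.Chars.splitOn cs [','] = pvSplitCh cs := by
  simp only [PySem.Chars.splitOn]
  rw [pvSplitOn_go cs (cs.length + 1) [] [] (by omega)]
  simp [pvConsHead_nil _ (pvSplitCh_ne_nil cs)]

-- A's inner fold over the parts
def pvFoldParts (ps : List (List Char)) (acc : List String) : List String :=
  ps.foldl (fun ing part =>
    let cleaned := PySem.Chars.strip (part.filter pvKeep)
    if cleaned.isEmpty then ing else ing ++ [String.ofList cleaned]) acc

-- the heart: the fused scan equals A's split-then-clean fold, per text
theorem pvScan_eq (cs : List Char) : ∀ (pre : List Char) (acc : List String),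
    pvFlush (pvScan cs (pre.filter pvKeep) acc).1 (pvScan cs (pre.filter pvKeep) acc).2
      = pvFoldParts (pvConsHead pre (pvSplitCh (cs.map pvSigma))) acc := by
  induction cs with
  | nil =>
    intro pre acc
    simp [pvScan, pvSplitCh, pvConsHead, pvFoldParts, pvFlush]
  | cons c t ih =>
    intro pre acc
    by_cases hcs : c = ',' ∨ c = ';'
    · have hσ : pvSigma c = ',' := by
        rcases hcs with h | h <;> simp [pvSigma, h]
      have hsplit : pvSplitCh ((c :: t).map pvSigma) = [] :: pvSplitCh (t.map pvSigma) := by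
        simp [pvSplitCh, hσ]
      rw [show pvScan (c :: t) (pre.filter pvKeep) acc
            = pvScan t [] (pvFlush (pre.filter pvKeep) acc) by simp [pvScan, hcs]]
      rw [show ([] : List Char) = List.filter pvKeep [] from rfl, ih]
      rw [hsplit]
      rw [show pvConsHead pre ([] :: pvSplitCh (t.map pvSigma))
            = pre :: pvSplitCh (t.map pvSigma) by simp [pvConsHead]]
      rw [pvConsHead_nil _ (pvSplitCh_ne_nil _)]
      simp [pvFoldParts, pvFlush]
    · rcases not_or.mp hcs with ⟨hc1, hc2⟩
      have hσ : pvSigma c = c := by simp [pvSigma, hc2]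
      have hsplit : pvSplitCh ((c :: t).map pvSigma)
          = pvConsHead [c] (pvSplitCh (t.map pvSigma)) := by
        simp [pvSplitCh, hσ, hc1]
      rw [hsplit, pvConsHead_consHead]
      have hstep : ∀ (buf : List Char) (a : List String), pvScan (c :: t) buf a
          = if pvKeep c then pvScan t (buf ++ [c]) a else pvScan t buf a := by
        intro buf a
        simp [pvScan, hc1, hc2, pvKeep]
      by_cases hk : pvKeep c = true
      · rw [hstep, if_pos hk]
        rw [show pre.filter pvKeep ++ [c] = (pre ++ [c]).filter pvKeep by
            simp [List.filter_append, hk]]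
        exact ih (pre ++ [c]) acc
      · simp only [Bool.not_eq_true] at hk
        rw [hstep, if_neg (by simp [hk])]
        rw [show pre.filter pvKeep = (pre ++ [c]).filter pvKeep by
            simp [List.filter_append, hk]]
        exact ih (pre ++ [c]) acc

-- per-entry step functions of A and B agree
theorem pvStep_eq (acc : List String) (entry : String × String) :
    (fun ingredient_list (entry : String × String) =>
      let text := entry.2
      let split_text := PySem.Chars.splitOn (PySem.Chars.replace text.toList [';'] [',']) [',']
      split_text.foldl (fun ing part =>
        let cleaned := PySem.Chars.strip
          (part.filter (fun x => PySem.Chars.isalnum x || PySem.Chars.isspace x))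
        if cleaned.isEmpty then ing else ing ++ [String.ofList cleaned]) ingredient_list) acc entry
    = (fun acc (entry : String × String) =>
        let p := pvScan entry.2.toList [] acc
        pvFlush p.1 p.2) acc entry := by
  simp only
  rw [pvReplace_eq, pvSplitOn_eq]
  have h := pvScan_eq entry.2.toList [] acc
  rw [pvConsHead_nil _ (pvSplitCh_ne_nil _)] at h
  rw [show (List.filter pvKeep [] : List Char) = [] from rfl] at h
  rw [h]
  rfl

-- ===== VERDICT (by name: the statement is the Claim_ definition above) =====
theorem extract_ingredients_list_spec : Claim_equal_extract_ingredients_list := by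
  intro ocr_output _
  unfold Spec_extract_ingredients_list extract_ingredients_list extract_ingredients_list_alt
  congr 1
  funext acc entry
  exact pvStep_eq acc entry
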